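-- pv_equiv track=rewrite | github.com/eliottcassidy2000/math | 04-computation/tournament_cycle_structure.py | compute_p_expansion
-- ===== SOURCE A (Python) =====
-- from itertools import permutations
-- from collections import defaultdict, Counter
--
-- def get_cycles(perm):
--     n = len(perm); visited = [False]*n; cycles = []
--     for start in range(n):
--         if visited[start]: continue
--         cycle = []; v = start
--         while not visited[v]:
--             visited[v] = True; cycle.append(v); v = perm[v]
--         cycles.append(tuple(cycle))
--     return cycles
--
-- def is_directed_cycle_in(cycle, adj):
--     k = len(cycle)
--     if k == 1: return True
--     return all(adj.get((cycle[i], cycle[(i+1)%k]), 0) == 1 for i in range(k))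
--
-- def compute_p_expansion(n, adj):
--     adj_op = {(j,i): adj.get((i,j),0) for i in range(n) for j in range(n) if i!=j}
--     coeffs = defaultdict(int)
--     for perm_tuple in permutations(range(n)):
--         perm = list(perm_tuple); cycles = get_cycles(perm)
--         phi = 0; valid = True
--         for cycle in cycles:
--             if len(cycle) == 1: continue
--             in_T = is_directed_cycle_in(cycle, adj)
--             in_Top = is_directed_cycle_in(cycle, adj_op)
--             if not in_T and not in_Top: valid = False; break
--             if in_Top and not in_T: phi += len(cycle) - 1
--         if not valid: continue
--         partition = tuple(sorted([len(c) for c in cycles], reverse=True))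
--         coeffs[partition] += (-1)**phi
--     return dict(coeffs)
-- ===== SOURCE B (Python) =====
-- from itertools import permutations
--
-- def compute_p_expansion(n, adj):
--     # Phase 1: enumerate every simple directed cycle (canonical: minimum vertex
--     # first) by DFS, classifying it once against adj in both directions, with
--     # pruning as soon as neither direction can survive.  info maps each cycle
--     # that is valid (forward or backward) to its sign exponent contribution.
--     info = {}
--
--     def grow(path, fwd, bwd):
--         u = path[-1]
--         m = path[0]
--         if len(path) >= 2:
--             cf = fwd and adj.get((u, m), 0) == 1
--             cb = bwd and adj.get((m, u), 0) == 1
--             if cf or cb: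
--                 info[tuple(path)] = (len(path) - 1) if (cb and not cf) else 0
--         for w in range(m + 1, n):
--             if w in path:
--                 continue
--             f2 = fwd and adj.get((u, w), 0) == 1
--             b2 = bwd and adj.get((w, u), 0) == 1
--             if f2 or b2:
--                 grow(path + [w], f2, b2)
--
--     for m in range(n):
--         grow([m], True, True)
--
--     # Phase 2: per permutation only decompose (popping the minimum of the
--     # not-yet-assigned vertex set) and look each nontrivial cycle up in info.
--     coeffs = {}
--     for perm in permutations(range(n)):
--         remaining = set(range(n))
--         sizes = []
--         phi = 0
--         ok = True
--         while remaining and ok: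
--             m = min(remaining)
--             remaining.discard(m)
--             cyc = [m]
--             v = perm[m]
--             while v != m:
--                 remaining.discard(v)
--                 cyc.append(v)
--                 v = perm[v]
--             sizes.append(len(cyc))
--             if len(cyc) > 1:
--                 p = info.get(tuple(cyc))
--                 if p is None:
--                     ok = False
--                 else:
--                     phi += p
--         if ok:
--             key = tuple(sorted(sizes, reverse=True))
--             coeffs[key] = coeffs.get(key, 0) + (-1) ** phi
--     return coeffs
-- ===== Notes on version B (the rewrite author's own statement) =====
-- stated objective: alternative
-- what changed: B adds a precomputation phase that DFS-enumerates every simple directed cycle (minimum vertex first, pruned as soon as neither orientation can survive) and classifies each against adj once, so the per-permutation work reduces to a set-popping cycle decomposition plus one hash lookup per cycle, eliminating A's reversed-adjacency dict and its two per-cycle modular edge scans.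
import Mathlib
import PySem

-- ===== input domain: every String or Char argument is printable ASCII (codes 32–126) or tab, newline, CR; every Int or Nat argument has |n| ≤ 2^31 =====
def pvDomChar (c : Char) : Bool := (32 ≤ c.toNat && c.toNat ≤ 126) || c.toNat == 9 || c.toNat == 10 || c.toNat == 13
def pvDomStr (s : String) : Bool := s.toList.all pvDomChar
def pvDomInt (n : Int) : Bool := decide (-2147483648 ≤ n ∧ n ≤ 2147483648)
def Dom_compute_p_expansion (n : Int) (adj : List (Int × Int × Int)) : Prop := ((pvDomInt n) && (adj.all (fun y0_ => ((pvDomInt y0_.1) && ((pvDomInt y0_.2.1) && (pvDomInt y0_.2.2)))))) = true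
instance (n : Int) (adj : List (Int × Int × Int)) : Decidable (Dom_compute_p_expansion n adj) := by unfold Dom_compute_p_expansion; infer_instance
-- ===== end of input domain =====

-- B pre-enumerates and classifies every simple directed cycle once (DFS with pruning),
-- so each permutation needs only a set-popping decomposition plus one lookup per cycle
-- (a different algorithmic split of the same n!-order enumeration; objective: alternative).

-- ===== PORT A =====
-- the dict argument, marshalled from the association list exactly as Python builds a dict
def pvAdjDict (adj : List (Int × Int × Int)) : PySem.Dict (Int × Int) Int :=
  adj.foldl (fun d t => d.insert (t.1, t.2.1) t.2.2) PySem.Dict.empty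

-- the 'while not visited[v]' loop of get_cycles (fuel-totalized; the loop marks a fresh
-- cell each iteration, so fuel = len(visited)+1 is never exhausted on reachable states)
def pvWalkA (perm : List Int) : Nat → List Bool → List Int → Int → List Bool × List Int
  | 0, visited, cycle, _ => (visited, cycle)
  | f + 1, visited, cycle, v =>
    if PySem.List.pyGetD visited v false then (visited, cycle)
    else pvWalkA perm f (PySem.List.pySetD visited v true) (cycle ++ [v]) (PySem.List.pyGetD perm v 0)

def pvGetCycles (perm : List Int) : List (List Int) :=
  ((PySem.List.pyRange 0 (PySem.List.len perm) 1).foldl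
    (fun (st : List Bool × List (List Int)) start =>
      if PySem.List.pyGetD st.1 start false then st
      else
        let r := pvWalkA perm (st.1.length + 1) st.1 [] start
        (r.1, st.2 ++ [r.2]))
    (PySem.List.pyRepeat [false] (PySem.List.len perm), [])).2

def pvIsDirCycle (c : List Int) (d : PySem.Dict (Int × Int) Int) : Bool :=
  let k := PySem.List.len c
  if k == 1 then true
  else (PySem.List.pyRange 0 k 1).all (fun i =>
    d.getD (PySem.List.pyGetD c i 0, PySem.List.pyGetD c (PySem.Int.mod (i + 1) k) 0) 0 == 1)

-- the 'for cycle in cycles: … break' loop of compute_p_expansion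
def pvLoopCycles (d dop : PySem.Dict (Int × Int) Int) : List (List Int) → Int → Bool × Int
  | [], phi => (true, phi)
  | c :: rest, phi =>
    if PySem.List.len c == 1 then pvLoopCycles d dop rest phi
    else
      let inT := pvIsDirCycle c d
      let inTop := pvIsDirCycle c dop
      if !inT && !inTop then (false, phi)
      else pvLoopCycles d dop rest (if inTop && !inT then phi + (PySem.List.len c - 1) else phi)

def compute_p_expansion (n : Int) (adj : List (Int × Int × Int)) : List (List Int × Int) :=
  let d := pvAdjDict adj
  let adjOp := (PySem.List.pyRange 0 n 1).foldl (fun dd i =>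
      (PySem.List.pyRange 0 n 1).foldl (fun dd j =>
        if i = j then dd else dd.insert (j, i) (d.getD (i, j) 0)) dd)
    PySem.Dict.empty
  let rng := PySem.List.pyRange 0 n 1
  ((PySem.List.permutations rng rng.length).foldl (fun co perm =>
      let cycles := pvGetCycles perm
      let r := pvLoopCycles d adjOp cycles 0
      if r.1 then
        let partition := PySem.List.sorted (cycles.map (fun c => PySem.List.len c)) (fun x => x) true
        co.modify partition 0 (· + (-1 : Int) ^ r.2.toNat)
      else co)
    PySem.Dict.empty).items

-- ===== PORT B =====
-- 'def grow(path, fwd, bwd)': DFS over simple paths (minimum vertex first), classifying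
-- each closable cycle in both directions at once, pruning when neither survives
-- (fuel-totalized: the path gains a fresh vertex each level, so fuel n+1 never runs out)
def pvGrow (d : PySem.Dict (Int × Int) Int) (n : Int) :
    Nat → PySem.Dict (List Int) Int → List Int → Bool → Bool → PySem.Dict (List Int) Int
  | 0, info, _, _, _ => info
  | f + 1, info, path, fwd, bwd =>
    let u := PySem.List.pyGetD path (-1) 0
    let m := PySem.List.pyGetD path 0 0
    let info1 :=
      if 2 ≤ PySem.List.len path then
        let cf := fwd && (d.getD (u, m) 0 == 1)
        let cb := bwd && (d.getD (m, u) 0 == 1)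
        if cf || cb then
          info.insert path (if cb && !cf then PySem.List.len path - 1 else 0)
        else info
      else info
    (PySem.List.pyRange (m + 1) n 1).foldl (fun inf w =>
      if path.contains w then inf
      else
        let f2 := fwd && (d.getD (u, w) 0 == 1)
        let b2 := bwd && (d.getD (w, u) 0 == 1)
        if f2 || b2 then pvGrow d n f inf (path ++ [w]) f2 b2 else inf) info1

-- 'while v != m: remaining.discard(v); cyc.append(v); v = perm[v]' (fuel-totalized)
def pvWalkC (perm : List Int) (m : Int) : Nat → PySem.Set Int → List Int → Int → PySem.Set Int × List Int
  | 0, rem, cyc, _ => (rem, cyc)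
  | f + 1, rem, cyc, v =>
    if v == m then (rem, cyc)
    else pvWalkC perm m f (PySem.Set.discard rem v) (cyc ++ [v]) (PySem.List.pyGetD perm v 0)

-- 'while remaining and ok: m = min(remaining); …' (fuel-totalized; each pass pops ≥ 1)
def pvScanB (info : PySem.Dict (List Int) Int) (perm : List Int) :
    Nat → PySem.Set Int → List Int → Int → Bool → List Int × Int × Bool
  | 0, _, sizes, phi, ok => (sizes, phi, ok)
  | f + 1, rem, sizes, phi, ok =>
    if rem.isEmpty || !ok then (sizes, phi, ok)
    else
      let m := (PySem.List.min? rem (fun x => x)).getD 0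
      let rem1 := PySem.Set.discard rem m
      let w := pvWalkC perm m (rem.length + 1) rem1 [m] (PySem.List.pyGetD perm m 0)
      let k := PySem.List.len w.2
      let sizes' := sizes ++ [k]
      if 1 < k then
        match info.get? w.2 with
        | none => pvScanB info perm f w.1 sizes' phi false
        | some p => pvScanB info perm f w.1 sizes' (phi + p) ok
      else pvScanB info perm f w.1 sizes' phi ok

def compute_p_expansion_alt (n : Int) (adj : List (Int × Int × Int)) : List (List Int × Int) :=
  let d := pvAdjDict adj
  let info := (PySem.List.pyRange 0 n 1).foldl
      (fun inf m => pvGrow d n (n.toNat + 1) inf [m] true true) PySem.Dict.empty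
  let rng := PySem.List.pyRange 0 n 1
  ((PySem.List.permutations rng rng.length).foldl (fun co perm =>
      let r := pvScanB info perm (n.toNat + 1) (PySem.Set.ofList rng) [] 0 true
      if r.2.2 then
        let key := PySem.List.sorted r.1 (fun x => x) true
        co.insert key (co.getD key 0 + (-1 : Int) ^ r.2.1.toNat)
      else co)
    PySem.Dict.empty).items

-- ===== PRECONDITION & SPEC =====
def Spec_compute_p_expansion (n : Int) (adj : List (Int × Int × Int)) (out : List (List Int × Int)) : Prop := out = compute_p_expansion_alt n adj
instance (n : Int) (adj : List (Int × Int × Int)) (out : List (List Int × Int)) : Decidable (Spec_compute_p_expansion n adj out) := by unfold Spec_compute_p_expansion; infer_instance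

-- ===== CLAIM (what is proved, stated in full; the proofs are below) =====
def Claim_equal_compute_p_expansion : Prop := ∀ (n : Int) (adj : List (Int × Int × Int)), Dom_compute_p_expansion n adj → Spec_compute_p_expansion n adj (compute_p_expansion n adj)

-- ===== LEMMAS AND PROOFS =====

-- ---------- generic helpers ----------

theorem pvFoldlPres {A G : Type} (g : A → G) (F : A → Int → A) (ws : List Int) (a : A)
    (h : ∀ b w, w ∈ ws → g (F b w) = g b) : g (ws.foldl F a) = g a := by
  induction ws generalizing a with
  | nil => rfl
  | cons w ws ih =>
    rw [List.foldl_cons, ih _ (fun b x hx => h b x (List.mem_cons_of_mem _ hx)),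
      h a w List.mem_cons_self]

theorem pvNodupSubsetLen {l1 l2 : List Int} (h1 : l1.Nodup) (h2 : l1 ⊆ l2) :
    l1.length ≤ l2.length :=
  (List.subperm_of_subset h1 h2).length_le

-- pyGetD after pySetD at nonnegative indices
theorem pvGetD_setD_self (xs : List Bool) (i : Int) (v d : Bool)
    (h0 : 0 ≤ i) (h1 : i < (xs.length : Int)) :
    PySem.List.pyGetD (PySem.List.pySetD xs i v) i d = v := by
  have h2 : i.toNat < xs.length := by omega
  rw [PySem.List.pySetD_of_nonneg xs v h0, PySem.List.pyGetD_of_nonneg _ _ h0]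
  simp [List.getD_eq_getElem?_getD, h2]

theorem pvGetD_setD_ne (xs : List Bool) (i j : Int) (v d : Bool)
    (h0 : 0 ≤ i) (h0' : 0 ≤ j) (hne : i ≠ j) :
    PySem.List.pyGetD (PySem.List.pySetD xs i v) j d = PySem.List.pyGetD xs j d := by
  have h2 : i.toNat ≠ j.toNat := by omega
  rw [PySem.List.pySetD_of_nonneg xs v h0, PySem.List.pyGetD_of_nonneg _ _ h0',
    PySem.List.pyGetD_of_nonneg _ _ h0']
  simp [List.getD_eq_getElem?_getD, h2]

theorem pvGetD_replicate_false (k : Nat) (x : Int) :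
    PySem.List.pyGetD (List.replicate k false) x false = false := by
  cases h : PySem.List.pyGet? (List.replicate k false) x with
  | none => simp [PySem.List.pyGetD_of_none _ _ _ h]
  | some b =>
    have hb : b ∈ List.replicate k false := PySem.List.mem_of_pyGet?_eq_some _ h
    have : b = false := List.eq_of_mem_replicate hb
    subst this
    simp [PySem.List.pyGetD, h]

-- ---------- the edge list of a cycle ----------

theorem pvEdges_eq (c : List Int) :
    c.zip (c.drop 1 ++ c.take 1) =
      (List.range c.length).map (fun i => (c.getD i 0, c.getD ((i + 1) % c.length) 0)) := by
  cases hc : c with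
  | nil => simp
  | cons a c' =>
    rw [← hc]
    have hL : c.length ≠ 0 := by rw [hc]; simp
    apply List.ext_getElem
    · simp only [List.length_zip, List.length_map, List.length_range, List.length_append,
        List.length_drop, List.length_take]
      omega
    · intro i h1 h2
      have hiL : i < c.length := by
        simp only [List.length_zip, List.length_append, List.length_drop, List.length_take] at h1
        omega
      rw [List.getElem_zip, List.getElem_map, List.getElem_range]
      by_cases hi2 : i + 1 < c.length
      · have hm : (i + 1) % c.length = i + 1 := Nat.mod_eq_of_lt hi2
        rw [hm, List.getD_eq_getElem c 0 hiL, List.getD_eq_getElem c 0 hi2]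
        rw [List.getElem_append_left (by simp only [List.length_drop]; omega)]
        simp only [List.getElem_drop]
        simp only [show 1 + i = i + 1 from by omega]
      · have hi3 : i + 1 = c.length := by omega
        have hm : (i + 1) % c.length = 0 := by rw [hi3, Nat.mod_self]
        rw [hm, List.getD_eq_getElem c 0 hiL, List.getD_eq_getElem c 0 (by omega)]
        rw [List.getElem_append_right (by simp only [List.length_drop]; omega)]
        simp only [List.getElem_take]
        simp only [show i - (c.drop 1).length = 0 from by simp only [List.length_drop]; omega]

-- the modular-index all of A equals the zip all (for k ≠ 1; k = 0 is trivially true)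
theorem pvIsDir_eq_zip (c : List Int) (dd : PySem.Dict (Int × Int) Int) (hk : c.length ≠ 1) :
    pvIsDirCycle c dd =
      (c.zip (c.drop 1 ++ c.take 1)).all (fun e => dd.getD (e.1, e.2) 0 == 1) := by
  have hk1 : (((c.length : Int)) == (1 : Int)) = false := by
    simp only [beq_eq_false_iff_ne, ne_eq]
    omega
  rw [pvEdges_eq]
  simp only [pvIsDirCycle, PySem.List.len, hk1, Bool.false_eq_true, if_false,
    PySem.List.pyRange_zero_nat, List.all_map]
  apply List.all_congr rfl
  intro i
  have hcast : ((i : Int) + 1) = ((i + 1 : Nat) : Int) := by push_cast; ring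
  simp only [Function.comp_apply, hcast, PySem.Int.mod_natCast, PySem.List.pyGetD_natCast]

-- every edge of a Nodup in-range cycle (k ≠ 1) has distinct in-range endpoints
theorem pvEdges_mem (c : List Int) (N : Int) (hnd : c.Nodup)
    (hb : ∀ x ∈ c, 0 ≤ x ∧ x < N) (hk : c.length ≠ 1) :
    ∀ e ∈ c.zip (c.drop 1 ++ c.take 1),
      (0 ≤ e.1 ∧ e.1 < N) ∧ (0 ≤ e.2 ∧ e.2 < N) ∧ e.1 ≠ e.2 := by
  intro e he
  rw [pvEdges_eq] at he
  simp only [List.mem_map, List.mem_range] at he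
  obtain ⟨i, hi, rfl⟩ := he
  have hL2 : 2 ≤ c.length := by omega
  have hmod : (i + 1) % c.length < c.length := Nat.mod_lt _ (by omega)
  have hmodc : (i + 1) % c.length = if i + 1 < c.length then i + 1 else 0 := by
    split
    · exact Nat.mod_eq_of_lt (by assumption)
    · have : i + 1 = c.length := by omega
      rw [this, Nat.mod_self]
  rw [List.getD_eq_getElem c 0 hi, List.getD_eq_getElem c 0 hmod]
  refine ⟨hb _ (List.getElem_mem _), hb _ (List.getElem_mem _), ?_⟩
  intro heq
  have := (List.Nodup.getElem_inj_iff hnd).mp heq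
  rw [hmodc] at this
  split at this <;> omega

-- the split of the cyclic edge list into chain edges plus the closing edge
theorem pvEdges_split (c : List Int) (hc : c ≠ []) :
    c.zip (c.drop 1 ++ c.take 1) = c.zip (c.drop 1) ++ [(c.getLastD 0, c.headD 0)] := by
  rcases List.eq_nil_or_concat c with rfl | ⟨q, a, rfl⟩
  · exact absurd rfl hc
  cases q with
  | nil => simp
  | cons x q' =>
    have hlen : (x :: q').length = (q' ++ [a]).length := by simp
    simp only [List.concat_eq_append]
    have hd : ((x :: q') ++ [a]).drop 1 = q' ++ [a] := by simp
    have ht : ((x :: q') ++ [a]).take 1 = [x] := by simp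
    rw [hd, ht]
    have h1 : ((x :: q') ++ [a]).zip ((q' ++ [a]) ++ [x]) =
        (x :: q').zip (q' ++ [a]) ++ ([a].zip [x]) := List.zip_append hlen
    have h2 : ((x :: q') ++ [a]).zip (q' ++ [a]) =
        (x :: q').zip (q' ++ [a]) ++ ([a].zip ([] : List Int)) := by
      have := List.zip_append (l₁ := x :: q') (r₁ := [a]) (l₂ := q' ++ [a]) (r₂ := ([] : List Int)) hlen
      simpa using this
    rw [List.append_assoc] at h1 ⊢
    rw [h1, h2]
    simp only [List.zip_nil_right, List.append_nil, List.zip_cons_cons]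
    rw [List.getLastD_eq_getLast?, List.getLast?_concat]
    simp

-- ---------- the reversed-adjacency dict A precomputes ----------

theorem pvAdjOp_inner (d : PySem.Dict (Int × Int) Int) (a b i : Int) (J : List Int) :
    ∀ dd : PySem.Dict (Int × Int) Int,
    (J.foldl (fun dd j => if i = j then dd else dd.insert (j, i) (d.getD (i, j) 0)) dd).getD (a, b) 0
      = if i = b ∧ a ∈ J ∧ a ≠ i then d.getD (b, a) 0 else dd.getD (a, b) 0 := by
  induction J with
  | nil => intro dd; simp
  | cons j J ih =>
    intro dd
    simp only [List.foldl_cons, ih, List.mem_cons]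
    by_cases h4 : i = j
    · subst h4
      by_cases h1 : i = b <;> by_cases h2 : a ∈ J <;> by_cases h3 : a = i <;> simp_all
    · rw [if_neg h4]
      by_cases h1 : i = b <;> by_cases h2 : a ∈ J <;> by_cases h5 : a = j <;>
        by_cases h3 : a = i <;>
        simp_all [PySem.Dict.getD_insert, Prod.ext_iff] <;>
        exact fun hb => absurd hb.symm h1

theorem pvAdjOp_outer (d : PySem.Dict (Int × Int) Int) (a b : Int) (J0 I : List Int) :
    ∀ dd : PySem.Dict (Int × Int) Int,
    (I.foldl (fun dd i => J0.foldl (fun dd j =>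
        if i = j then dd else dd.insert (j, i) (d.getD (i, j) 0)) dd) dd).getD (a, b) 0
      = if b ∈ I ∧ a ∈ J0 ∧ a ≠ b then d.getD (b, a) 0 else dd.getD (a, b) 0 := by
  induction I with
  | nil => intro dd; simp
  | cons i I ih =>
    intro dd
    simp only [List.foldl_cons, ih]
    rw [pvAdjOp_inner d a b i J0]
    by_cases h1 : i = b
    · subst h1
      by_cases hC : a ∈ J0 ∧ a ≠ i
      · by_cases hI : i ∈ I
        · rw [if_pos ⟨hI, hC.1, hC.2⟩, if_pos ⟨List.mem_cons_self, hC.1, hC.2⟩]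
        · rw [if_neg (fun hh => hI hh.1), if_pos ⟨rfl, hC.1, hC.2⟩,
            if_pos ⟨List.mem_cons_self, hC.1, hC.2⟩]
      · have hC' : ∀ (P : Prop), ¬(P ∧ a ∈ J0 ∧ a ≠ i) := fun P hh => hC ⟨hh.2.1, hh.2.2⟩
        rw [if_neg (hC' _), if_neg (hC' _), if_neg (hC' _)]
    · have hinner : ¬(i = b ∧ a ∈ J0 ∧ a ≠ i) := fun hh => h1 hh.1
      rw [if_neg hinner]
      by_cases h2 : b ∈ I ∧ a ∈ J0 ∧ a ≠ b
      · rw [if_pos h2, if_pos ⟨List.mem_cons_of_mem _ h2.1, h2.2⟩]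
      · rw [if_neg h2,
          if_neg (fun hh => h2 ⟨List.mem_of_ne_of_mem (fun hb => h1 hb.symm) hh.1, hh.2⟩)]

theorem pvAdjOp_getD (d : PySem.Dict (Int × Int) Int) (n a b : Int)
    (ha : 0 ≤ a) (ha' : a < n) (hb : 0 ≤ b) (hb' : b < n) (hne : a ≠ b) :
    ((PySem.List.pyRange 0 n 1).foldl (fun dd i =>
        (PySem.List.pyRange 0 n 1).foldl (fun dd j =>
          if i = j then dd else dd.insert (j, i) (d.getD (i, j) 0)) dd)
      PySem.Dict.empty).getD (a, b) 0 = d.getD (b, a) 0 := by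
  rw [pvAdjOp_outer]
  rw [if_pos ⟨PySem.List.mem_pyRange_one.mpr ⟨hb, hb'⟩,
    PySem.List.mem_pyRange_one.mpr ⟨ha, ha'⟩, hne⟩]

-- ---------- proof-side view of A's decomposition ----------

def pvCyclesAux (perm : List Int) : List Int → List Bool → List (List Int)
  | [], _ => []
  | st :: rest, seen =>
    if PySem.List.pyGetD seen st false then pvCyclesAux perm rest seen
    else
      let w := pvWalkA perm (seen.length + 1) seen [] st
      w.2 :: pvCyclesAux perm rest w.1

theorem pvGetCycles_eq (perm : List Int) :
    pvGetCycles perm = pvCyclesAux perm (PySem.List.pyRange 0 (PySem.List.len perm) 1)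
      (PySem.List.pyRepeat [false] (PySem.List.len perm)) := by
  have key : ∀ (starts : List Int) (seen : List Bool) (acc : List (List Int)),
      (starts.foldl (fun (st : List Bool × List (List Int)) start =>
        if PySem.List.pyGetD st.1 start false then st
        else
          let r := pvWalkA perm (st.1.length + 1) st.1 [] start
          (r.1, st.2 ++ [r.2])) (seen, acc)).2 = acc ++ pvCyclesAux perm starts seen := by
    intro starts
    induction starts with
    | nil => intro seen acc; simp [pvCyclesAux]
    | cons st rest ih =>
      intro seen acc
      simp only [List.foldl_cons, pvCyclesAux]
      by_cases h : PySem.List.pyGetD seen st false <;> simp [h, ih]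
  simpa [pvGetCycles] using key _ _ []

-- ---------- chains (successor lists of a permutation) ----------

def pvChain (perm : List Int) : List Int → Prop
  | [] => True
  | [_] => True
  | a :: b :: t => PySem.List.pyGetD perm a 0 = b ∧ pvChain perm (b :: t)

theorem pvChain_tail (perm : List Int) (a : Int) (l : List Int)
    (h : pvChain perm (a :: l)) : pvChain perm l := by
  cases l with
  | nil => trivial
  | cons b t => exact h.2

theorem pvChain_snoc (perm : List Int) (p : List Int) (v : Int)
    (h : pvChain perm p) (hl : p = [] ∨ PySem.List.pyGetD perm (p.getLastD 0) 0 = v) :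
    pvChain perm (p ++ [v]) := by
  induction p with
  | nil => trivial
  | cons a p ih =>
    cases p with
    | nil =>
      rcases hl with hl | hl
      · simp at hl
      · exact ⟨hl, trivial⟩
    | cons b q =>
      refine ⟨h.1, ih h.2 ?_⟩
      rcases hl with hl | hl
      · simp at hl
      · right; exact hl

theorem pvChain_getElem (perm : List Int) : ∀ (l : List Int), pvChain perm l →
    ∀ (i : Nat), (hi : i + 1 < l.length) →
    PySem.List.pyGetD perm (l[i]'(by omega)) 0 = l[i + 1] := by
  intro l
  induction l with
  | nil => intro _ i hi; simp at hi
  | cons a l ih =>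
    intro h i hi
    cases l with
    | nil => simp at hi
    | cons b q =>
      cases i with
      | zero => simpa using h.1
      | succ j =>
        have := ih h.2 j (by simpa using hi)
        simpa using this

theorem pvGetLastD_eq_getElem (l : List Int) (hl : l ≠ []) :
    l.getLastD 0 = l[l.length - 1]'(by cases l with | nil => simp at hl | cons a t => simp) := by
  rw [List.getLastD_eq_getLast?, List.getLast?_eq_some_getLast hl, Option.getD_some,
    List.getLast_eq_getElem]

theorem pvHeadD_eq_getElem (l : List Int) (hl : l ≠ []) :
    l.headD 0 = l[0]'(by cases l with | nil => simp at hl | cons a t => simp) := by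
  cases l with
  | nil => simp at hl
  | cons a t => rfl

-- if v, the successor of the last chain element, lies in the Nodup chain, it is the head
theorem pvChain_mem_head (perm : List Int) (N : Int)
    (hinj : ∀ i j : Int, 0 ≤ i → i < N → 0 ≤ j → j < N →
      PySem.List.pyGetD perm i 0 = PySem.List.pyGetD perm j 0 → i = j)
    (acc : List Int) (v : Int) (hne : acc ≠ []) (hch : pvChain perm acc)
    (hnd : acc.Nodup) (hb : ∀ x ∈ acc, 0 ≤ x ∧ x < N)
    (hlast : PySem.List.pyGetD perm (acc.getLastD 0) 0 = v) (hv : v ∈ acc) :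
    v = acc.headD 0 := by
  obtain ⟨i, hi, hiv⟩ := List.mem_iff_getElem.mp hv
  have hLpos : 0 < acc.length := List.length_pos_iff.mpr hne
  rcases Nat.eq_zero_or_pos i with h0 | hpos
  · subst h0; rw [← hiv, pvHeadD_eq_getElem acc hne]
  · exfalso
    have hstep : PySem.List.pyGetD perm (acc[i-1]'(by omega)) 0 = acc[i]'hi := by
      have := pvChain_getElem perm acc hch (i - 1) (by omega)
      simpa [Nat.sub_add_cancel hpos] using this
    rw [pvGetLastD_eq_getElem acc hne] at hlast
    have hb1 := hb _ (List.getElem_mem (l := acc) (n := i - 1) (by omega))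
    have hb2 := hb _ (List.getElem_mem (l := acc) (n := acc.length - 1) (by omega))
    have heq : acc[i-1]'(by omega) = acc[acc.length - 1]'(by omega) := by
      apply hinj _ _ hb1.1 hb1.2 hb2.1 hb2.2
      rw [hstep, hlast, hiv]
    have := (List.Nodup.getElem_inj_iff hnd).mp heq
    omega

-- a closed chain is closed under the permutation step
theorem pvChain_cycle_closed (perm : List Int) (p : List Int)
    (hch : pvChain perm p)
    (hcl : PySem.List.pyGetD perm (p.getLastD 0) 0 = p.headD 0) :
    ∀ x ∈ p, PySem.List.pyGetD perm x 0 ∈ p := by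
  intro x hx
  have hne : p ≠ [] := by rintro rfl; simp at hx
  obtain ⟨i, hi, rfl⟩ := List.mem_iff_getElem.mp hx
  by_cases hlast : i + 1 < p.length
  · rw [pvChain_getElem perm p hch i hlast]
    exact List.getElem_mem _
  · have : i = p.length - 1 := by omega
    subst this
    rw [← pvGetLastD_eq_getElem p hne, hcl, pvHeadD_eq_getElem p hne]
    exact List.getElem_mem _

-- ---------- the marked set is permuted onto itself ----------

theorem pvMarked_surj (perm : List Int) (N : Int)
    (hvals : ∀ x : Int, 0 ≤ x → x < N →
      0 ≤ PySem.List.pyGetD perm x 0 ∧ PySem.List.pyGetD perm x 0 < N)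
    (hinj : ∀ i j : Int, 0 ≤ i → i < N → 0 ≤ j → j < N →
      PySem.List.pyGetD perm i 0 = PySem.List.pyGetD perm j 0 → i = j)
    (seen : List Bool)
    (hclosed : ∀ x : Int, 0 ≤ x → x < N → PySem.List.pyGetD seen x false = true →
      PySem.List.pyGetD seen (PySem.List.pyGetD perm x 0) false = true)
    (v : Int) (hv0 : 0 ≤ v) (hv1 : v < N) (hvm : PySem.List.pyGetD seen v false = true) :
    ∃ x : Int, 0 ≤ x ∧ x < N ∧ PySem.List.pyGetD seen x false = true ∧
      PySem.List.pyGetD perm x 0 = v := by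
  classical
  set S : Finset ℕ := (Finset.range N.toNat).filter
    (fun i => PySem.List.pyGetD seen (i : Int) false = true) with hS
  set f : ℕ → ℕ := fun i => (PySem.List.pyGetD perm (i : Int) 0).toNat with hf
  have hmemS : ∀ i : ℕ, i ∈ S ↔ (i : Int) < N ∧ PySem.List.pyGetD seen (i : Int) false = true := by
    intro i
    simp only [hS, Finset.mem_filter, Finset.mem_range]
    constructor
    · rintro ⟨h1, h2⟩; exact ⟨by omega, h2⟩
    · rintro ⟨h1, h2⟩; exact ⟨by omega, h2⟩
  have hmaps : ∀ i ∈ S, f i ∈ S := by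
    intro i hi
    obtain ⟨h1, h2⟩ := (hmemS i).mp hi
    have hb := hvals (i : Int) (by positivity) h1
    have hcl := hclosed (i : Int) (by positivity) h1 h2
    rw [hmemS]
    constructor
    · simp only [hf]; omega
    · have : ((((PySem.List.pyGetD perm (i : Int) 0).toNat : Nat) : Int)) =
        PySem.List.pyGetD perm (i : Int) 0 := by omega
      rw [hf]; simp only []; rw [this]; exact hcl
  have hinjOn : Set.InjOn f S := by
    intro i hi j hj hij
    obtain ⟨h1, _⟩ := (hmemS i).mp hi
    obtain ⟨h2, _⟩ := (hmemS j).mp hj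
    have hbi := hvals (i : Int) (by positivity) h1
    have hbj := hvals (j : Int) (by positivity) h2
    have : PySem.List.pyGetD perm (i : Int) 0 = PySem.List.pyGetD perm (j : Int) 0 := by
      simp only [hf] at hij; omega
    have := hinj _ _ (by positivity) h1 (by positivity) h2 this
    omega
  have himg : S.image f = S := by
    apply Finset.eq_of_subset_of_card_le
    · intro y hy
      obtain ⟨i, hi, rfl⟩ := Finset.mem_image.mp hy
      exact hmaps i hi
    · rw [Finset.card_image_of_injOn hinjOn]
  have hvS : v.toNat ∈ S := by
    rw [hmemS]
    have : ((v.toNat : Nat) : Int) = v := by omega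
    rw [this]
    exact ⟨hv1, hvm⟩
  rw [← himg] at hvS
  obtain ⟨i, hi, hfi⟩ := Finset.mem_image.mp hvS
  obtain ⟨h1, h2⟩ := (hmemS i).mp hi
  refine ⟨(i : Int), by positivity, h1, h2, ?_⟩
  have hb := hvals (i : Int) (by positivity) h1
  simp only [hf] at hfi
  omega

-- ---------- characterization of A's walk ----------

theorem pvWalkA_go (perm : List Int) (N : Int)
    (hvals : ∀ x : Int, 0 ≤ x → x < N →
      0 ≤ PySem.List.pyGetD perm x 0 ∧ PySem.List.pyGetD perm x 0 < N)
    (hinj : ∀ i j : Int, 0 ≤ i → i < N → 0 ≤ j → j < N →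
      PySem.List.pyGetD perm i 0 = PySem.List.pyGetD perm j 0 → i = j)
    (seen0 : List Bool)
    (hclosed : ∀ x : Int, 0 ≤ x → x < N → PySem.List.pyGetD seen0 x false = true →
      PySem.List.pyGetD seen0 (PySem.List.pyGetD perm x 0) false = true) :
    ∀ (f : Nat) (seen : List Bool) (acc : List Int) (v : Int),
    (seen.length : Int) = N →
    (∀ x : Int, 0 ≤ x → x < N →
      (PySem.List.pyGetD seen x false = true ↔
        PySem.List.pyGetD seen0 x false = true ∨ x ∈ acc)) →
    acc ≠ [] → pvChain perm acc →
    PySem.List.pyGetD perm (acc.getLastD 0) 0 = v →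
    acc.Nodup →
    (∀ x ∈ acc, 0 ≤ x ∧ x < N ∧ PySem.List.pyGetD seen0 x false = false) →
    0 ≤ v → v < N →
    N + 1 ≤ (f : Int) + acc.length →
    ∃ (t : List Int) (seen2 : List Bool),
      pvWalkA perm f seen acc v = (seen2, acc ++ t) ∧
      (acc ++ t).Nodup ∧
      (∀ x ∈ acc ++ t, 0 ≤ x ∧ x < N ∧ PySem.List.pyGetD seen0 x false = false) ∧
      pvChain perm (acc ++ t) ∧
      PySem.List.pyGetD perm ((acc ++ t).getLastD 0) 0 = acc.headD 0 ∧
      (seen2.length : Int) = N ∧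
      (∀ x : Int, 0 ≤ x → x < N →
        (PySem.List.pyGetD seen2 x false = true ↔
          PySem.List.pyGetD seen0 x false = true ∨ x ∈ acc ++ t)) := by
  intro f
  induction f with
  | zero =>
    intro seen acc v hlen hiff hne hch hlast hnd hprops hv0 hv1 hfuel
    exfalso
    have hsub : acc ⊆ PySem.List.pyRange 0 N 1 := by
      intro x hx
      exact PySem.List.mem_pyRange_one.mpr ⟨(hprops x hx).1, (hprops x hx).2.1⟩
    have hle := pvNodupSubsetLen hnd hsub
    rw [PySem.List.length_pyRange_one] at hle
    obtain ⟨a, ha⟩ := List.exists_mem_of_ne_nil acc hne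
    have := (hprops a ha).1
    have := (hprops a ha).2.1
    simp only [Nat.cast_zero] at hfuel
    omega
  | succ f ih =>
    intro seen acc v hlen hiff hne hch hlast hnd hprops hv0 hv1 hfuel
    cases h : PySem.List.pyGetD seen v false with
    | true =>
      refine ⟨[], seen, ?_, ?_⟩
      · simp only [pvWalkA, h, if_true, List.append_nil]
      have hveq : v = acc.headD 0 := by
        rcases (hiff v hv0 hv1).mp h with h0 | hmem
        · exfalso
          obtain ⟨x, hx0, hx1, hxm, hxp⟩ := pvMarked_surj perm N hvals hinj seen0 hclosed v hv0 hv1 h0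
          have hlne : acc.getLastD 0 ∈ acc := by
            rw [pvGetLastD_eq_getElem acc hne]; exact List.getElem_mem _
          have hbl := hprops _ hlne
          have : x = acc.getLastD 0 :=
            hinj x _ hx0 hx1 hbl.1 hbl.2.1 (by rw [hxp, hlast])
          rw [this] at hxm
          rw [hbl.2.2] at hxm
          exact Bool.false_ne_true hxm
        · exact pvChain_mem_head perm N hinj acc v hne hch hnd
            (fun x hx => ⟨(hprops x hx).1, (hprops x hx).2.1⟩) hlast hmem
      simp only [List.append_nil]
      exact ⟨hnd, hprops, hch, by rw [hlast, hveq], hlen, hiff⟩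
    | false =>
      have hvnacc : v ∉ acc := by
        intro hv
        have := (hiff v hv0 hv1).mpr (Or.inr hv)
        rw [h] at this; exact Bool.false_ne_true this
      have hvns : PySem.List.pyGetD seen0 v false = false := by
        cases h0 : PySem.List.pyGetD seen0 v false with
        | false => rfl
        | true =>
          have := (hiff v hv0 hv1).mpr (Or.inl h0)
          rw [h] at this; exact absurd this Bool.false_ne_true
      have hlen' : ((PySem.List.pySetD seen v true).length : Int) = N := by
        rw [PySem.List.length_pySetD]; exact hlen
      have hiff' : ∀ x : Int, 0 ≤ x → x < N →
          (PySem.List.pyGetD (PySem.List.pySetD seen v true) x false = true ↔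
            PySem.List.pyGetD seen0 x false = true ∨ x ∈ acc ++ [v]) := by
        intro x hx0 hx1
        by_cases hxv : x = v
        · subst hxv
          rw [pvGetD_setD_self _ _ _ _ hv0 (by omega)]
          simp
        · rw [pvGetD_setD_ne _ _ _ _ _ hv0 hx0 (fun hh => hxv hh.symm), hiff x hx0 hx1]
          simp only [List.mem_append, List.mem_singleton]
          constructor
          · rintro (h1 | h2)
            · exact Or.inl h1
            · exact Or.inr (Or.inl h2)
          · rintro (h1 | h2 | h3)
            · exact Or.inl h1
            · exact Or.inr h2
            · exact absurd h3 hxv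
      have hch' : pvChain perm (acc ++ [v]) := pvChain_snoc perm acc v hch (Or.inr hlast)
      have hnd' : (acc ++ [v]).Nodup := by
        refine List.Nodup.append hnd (List.nodup_singleton _) ?_
        intro a ha hb
        simp only [List.mem_singleton] at hb
        subst hb
        exact hvnacc ha
      have hprops' : ∀ x ∈ acc ++ [v], 0 ≤ x ∧ x < N ∧ PySem.List.pyGetD seen0 x false = false := by
        intro x hx
        rcases List.mem_append.mp hx with hx | hx
        · exact hprops x hx
        · simp only [List.mem_singleton] at hx; subst hx; exact ⟨hv0, hv1, hvns⟩
      have hlast' : PySem.List.pyGetD perm ((acc ++ [v]).getLastD 0) 0 =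
          PySem.List.pyGetD perm v 0 := by
        simp
      have hvb := hvals v hv0 hv1
      obtain ⟨t, seen2, heq, c1, c2, c3, c4, c5, c6⟩ :=
        ih (PySem.List.pySetD seen v true) (acc ++ [v]) (PySem.List.pyGetD perm v 0)
          hlen' hiff' (by simp) hch' hlast' hnd' hprops' hvb.1 hvb.2
          (by simp only [List.length_append, List.length_cons, List.length_nil]; push_cast; push_cast at hfuel; omega)
      refine ⟨v :: t, seen2, ?_, ?_, ?_, ?_, ?_, c5, ?_⟩
      · simp only [pvWalkA, h, Bool.false_eq_true, if_false]
        rw [heq]; simp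
      · simpa using c1
      · intro x hx; exact c2 x (by simpa using hx)
      · simpa using c3
      · have : (acc ++ [v]).headD 0 = acc.headD 0 := by
          cases acc with
          | nil => exact absurd rfl hne
          | cons a t' => rfl
        rw [← this, ← c4]
        congr 1
        simp
      · intro x hx0 hx1
        rw [c6 x hx0 hx1]
        simp

theorem pvWalkA_run (perm : List Int) (N : Int)
    (hvals : ∀ x : Int, 0 ≤ x → x < N →
      0 ≤ PySem.List.pyGetD perm x 0 ∧ PySem.List.pyGetD perm x 0 < N)
    (hinj : ∀ i j : Int, 0 ≤ i → i < N → 0 ≤ j → j < N →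
      PySem.List.pyGetD perm i 0 = PySem.List.pyGetD perm j 0 → i = j)
    (seen0 : List Bool) (hlen : (seen0.length : Int) = N)
    (hclosed : ∀ x : Int, 0 ≤ x → x < N → PySem.List.pyGetD seen0 x false = true →
      PySem.List.pyGetD seen0 (PySem.List.pyGetD perm x 0) false = true)
    (s : Int) (hs0 : 0 ≤ s) (hs1 : s < N) (hsm : PySem.List.pyGetD seen0 s false = false) :
    ∃ (t : List Int) (seen2 : List Bool),
      pvWalkA perm (seen0.length + 1) seen0 [] s = (seen2, s :: t) ∧
      (s :: t).Nodup ∧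
      (∀ x ∈ s :: t, 0 ≤ x ∧ x < N ∧ PySem.List.pyGetD seen0 x false = false) ∧
      pvChain perm (s :: t) ∧
      PySem.List.pyGetD perm ((s :: t).getLastD 0) 0 = s ∧
      (seen2.length : Int) = N ∧
      (∀ x : Int, 0 ≤ x → x < N →
        (PySem.List.pyGetD seen2 x false = true ↔
          PySem.List.pyGetD seen0 x false = true ∨ x ∈ s :: t)) := by
  have hstep : pvWalkA perm (seen0.length + 1) seen0 [] s =
      pvWalkA perm seen0.length (PySem.List.pySetD seen0 s true) [s]
        (PySem.List.pyGetD perm s 0) := by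
    simp only [pvWalkA, hsm, Bool.false_eq_true, if_false, List.nil_append]
  have hsb := hvals s hs0 hs1
  obtain ⟨t, seen2, heq, c1, c2, c3, c4, c5, c6⟩ :=
    pvWalkA_go perm N hvals hinj seen0 hclosed seen0.length
      (PySem.List.pySetD seen0 s true) [s] (PySem.List.pyGetD perm s 0)
      (by rw [PySem.List.length_pySetD]; exact hlen)
      (by
        intro x hx0 hx1
        by_cases hxs : x = s
        · subst hxs
          rw [pvGetD_setD_self _ _ _ _ hs0 (by omega)]
          simp
        · rw [pvGetD_setD_ne _ _ _ _ _ hs0 hx0 (fun hh => hxs hh.symm)]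
          simp [hxs])
      (by simp) trivial (by simp) (List.nodup_singleton _)
      (by
        intro x hx
        simp only [List.mem_singleton] at hx
        subst hx
        exact ⟨hs0, hs1, hsm⟩)
      hsb.1 hsb.2 (by simp only [List.length_singleton]; push_cast; omega)
  exact ⟨t, seen2, by rw [hstep, heq]; rfl, by simpa using c1, by simpa using c2,
    by simpa using c3, by simpa using c4, c5, by
      intro x hx0 hx1
      rw [c6 x hx0 hx1]
      simp⟩

-- ---------- B's walk retraces the cycle ----------

theorem pvMemFoldlDiscard (l : List Int) : ∀ (r : List Int) (x : Int),
    x ∈ l.foldl PySem.Set.discard r ↔ x ∈ r ∧ x ∉ l := by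
  induction l with
  | nil => intro r x; simp
  | cons a l ih =>
    intro r x
    rw [List.foldl_cons, ih]
    rw [PySem.Set.mem_discard]
    simp only [List.mem_cons]
    constructor
    · rintro ⟨⟨h1, h2⟩, h3⟩; exact ⟨h1, by rintro (rfl | h) <;> [exact h2 rfl; exact h3 h]⟩
    · rintro ⟨h1, h2⟩; exact ⟨⟨h1, fun hh => h2 (Or.inl hh)⟩, fun hh => h2 (Or.inr hh)⟩

theorem pvNodupFoldlDiscard (l : List Int) : ∀ (r : List Int), r.Nodup →
    (l.foldl PySem.Set.discard r).Nodup := by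
  induction l with
  | nil => intro r h; exact h
  | cons a l ih => intro r h; exact ih _ (PySem.Set.nodup_discard _ _ h)

theorem pvWalkC_run (perm : List Int) (m : Int) :
    ∀ (rest : List Int) (fuel : Nat) (rem acc : List Int) (v : Int),
    rest.length + 2 ≤ fuel →
    m ∉ v :: rest →
    pvChain perm (v :: rest) →
    PySem.List.pyGetD perm ((v :: rest).getLastD 0) 0 = m →
    pvWalkC perm m fuel rem acc v =
      ((v :: rest).foldl PySem.Set.discard rem, acc ++ (v :: rest)) := by
  intro rest
  induction rest with
  | nil =>
    intro fuel rem acc v hf hm hch hcl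
    obtain ⟨f1, rfl⟩ : ∃ f1, fuel = f1 + 1 := ⟨fuel - 1, by omega⟩
    obtain ⟨f2, rfl⟩ : ∃ f2, f1 = f2 + 1 := ⟨f1 - 1, by omega⟩
    have hvm : (v == m) = false := by
      simp only [beq_eq_false_iff_ne]; intro h; exact hm (h ▸ List.mem_cons_self)
    simp only [pvWalkC, hvm, Bool.false_eq_true, if_false]
    have hcl' : PySem.List.pyGetD perm v 0 = m := by simpa using hcl
    rw [hcl']
    simp
  | cons c rest ih =>
    intro fuel rem acc v hf hm hch hcl
    obtain ⟨f1, rfl⟩ : ∃ f1, fuel = f1 + 1 := ⟨fuel - 1, by omega⟩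
    have hvm : (v == m) = false := by
      simp only [beq_eq_false_iff_ne]; intro h; exact hm (h ▸ List.mem_cons_self)
    simp only [pvWalkC, hvm, Bool.false_eq_true, if_false]
    have hvc : PySem.List.pyGetD perm v 0 = c := hch.1
    rw [hvc, ih f1 (PySem.Set.discard rem v) (acc ++ [v]) c (by simp at hf ⊢; omega)
      (fun hh => hm (List.mem_cons_of_mem _ hh)) hch.2
      (by simpa using hcl)]
    simp

-- ---------- incremental two-direction classification of a path / cycle ----------

def pvFwdB (d : PySem.Dict (Int × Int) Int) (c : List Int) : Bool :=
  (c.zip (c.drop 1)).all (fun e => d.getD (e.1, e.2) 0 == 1)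

def pvBwdB (d : PySem.Dict (Int × Int) Int) (c : List Int) : Bool :=
  (c.zip (c.drop 1)).all (fun e => d.getD (e.2, e.1) 0 == 1)

def pvCf (d : PySem.Dict (Int × Int) Int) (c : List Int) : Bool :=
  pvFwdB d c && (d.getD (c.getLastD 0, c.headD 0) 0 == 1)

def pvCb (d : PySem.Dict (Int × Int) Int) (c : List Int) : Bool :=
  pvBwdB d c && (d.getD (c.headD 0, c.getLastD 0) 0 == 1)

def pvCLS (d : PySem.Dict (Int × Int) Int) (c : List Int) : Option Int :=
  if pvCf d c || pvCb d c then
    some (if pvCb d c && !pvCf d c then (c.length : Int) - 1 else 0)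
  else none

theorem pvZipTail_snoc (p : List Int) (w : Int) (hp : p ≠ []) :
    (p ++ [w]).zip ((p ++ [w]).drop 1) = p.zip (p.drop 1) ++ [(p.getLastD 0, w)] := by
  induction p with
  | nil => simp at hp
  | cons a p ih =>
    cases p with
    | nil => simp
    | cons b q =>
      have h := ih (by simp)
      simp only [List.cons_append, List.drop_succ_cons, List.drop_zero, List.zip_cons_cons] at h ⊢
      rw [h]
      simp

theorem pvFwdB_snoc (d : PySem.Dict (Int × Int) Int) (p : List Int) (w : Int) (hp : p ≠ []) :
    pvFwdB d (p ++ [w]) = (pvFwdB d p && (d.getD (p.getLastD 0, w) 0 == 1)) := by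
  -- via the snoc form of the chain-edge list
  unfold pvFwdB
  rw [pvZipTail_snoc p w hp, List.all_append]
  simp

theorem pvBwdB_snoc (d : PySem.Dict (Int × Int) Int) (p : List Int) (w : Int) (hp : p ≠ []) :
    pvBwdB d (p ++ [w]) = (pvBwdB d p && (d.getD (w, p.getLastD 0) 0 == 1)) := by
  unfold pvBwdB
  rw [pvZipTail_snoc p w hp, List.all_append]
  simp

theorem pvFwdB_false_append (d : PySem.Dict (Int × Int) Int) :
    ∀ (t p : List Int), p ≠ [] → pvFwdB d p = false → pvFwdB d (p ++ t) = false := by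
  intro t
  induction t with
  | nil => intro p hp h; simpa using h
  | cons w t ih =>
    intro p hp h
    have : p ++ w :: t = (p ++ [w]) ++ t := by simp
    rw [this]
    apply ih _ (by simp)
    rw [pvFwdB_snoc d p w hp, h]
    rfl

theorem pvBwdB_false_append (d : PySem.Dict (Int × Int) Int) :
    ∀ (t p : List Int), p ≠ [] → pvBwdB d p = false → pvBwdB d (p ++ t) = false := by
  intro t
  induction t with
  | nil => intro p hp h; simpa using h
  | cons w t ih =>
    intro p hp h
    have : p ++ w :: t = (p ++ [w]) ++ t := by simp
    rw [this]
    apply ih _ (by simp)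
    rw [pvBwdB_snoc d p w hp, h]
    rfl

theorem pvCf_eq_isDir (d : PySem.Dict (Int × Int) Int) (c : List Int)
    (hc : c ≠ []) (hk : c.length ≠ 1) : pvCf d c = pvIsDirCycle c d := by
  rw [pvIsDir_eq_zip c d hk, pvEdges_split c hc, List.all_append]
  unfold pvCf pvFwdB
  simp

theorem pvCb_eq_isDir_op (d dop : PySem.Dict (Int × Int) Int) (c : List Int) (N : Int)
    (hc : c ≠ []) (hk : c.length ≠ 1) (hnd : c.Nodup) (hb : ∀ x ∈ c, 0 ≤ x ∧ x < N)
    (hop : ∀ a b : Int, 0 ≤ a → a < N → 0 ≤ b → b < N → a ≠ b →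
      dop.getD (a, b) 0 = d.getD (b, a) 0) :
    pvCb d c = pvIsDirCycle c dop := by
  rw [pvIsDir_eq_zip c dop hk]
  have hcongr : (c.zip (c.drop 1 ++ c.take 1)).all (fun e => dop.getD (e.1, e.2) 0 == 1)
      = (c.zip (c.drop 1 ++ c.take 1)).all (fun e => d.getD (e.2, e.1) 0 == 1) := by
    rw [Bool.eq_iff_iff]
    simp only [List.all_eq_true]
    constructor
    · intro hh e he
      have hm := pvEdges_mem c N hnd hb hk e he
      rw [← hop e.1 e.2 hm.1.1 hm.1.2 hm.2.1.1 hm.2.1.2 hm.2.2]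
      exact hh e he
    · intro hh e he
      have hm := pvEdges_mem c N hnd hb hk e he
      rw [hop e.1 e.2 hm.1.1 hm.1.2 hm.2.1.1 hm.2.1.2 hm.2.2]
      exact hh e he
  rw [hcongr, pvEdges_split c hc, List.all_append]
  unfold pvCb pvBwdB
  simp

-- ---------- what pvGrow's DFS writes into info ----------

theorem pvGrow_frame (d : PySem.Dict (Int × Int) Int) (n : Int) (c : List Int) :
    ∀ (fuel : Nat) (path : List Int) (info : PySem.Dict (List Int) Int) (fwd bwd : Bool),
    ¬ path <+: c →
    (pvGrow d n fuel info path fwd bwd).get? c = info.get? c := by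
  intro fuel
  induction fuel with
  | zero => intro path info fwd bwd h; rfl
  | succ f ih =>
    intro path info fwd bwd h
    simp only [pvGrow]
    have hpc : c ≠ path := fun hh => h (hh ▸ List.prefix_refl _)
    have h1 : (if 2 ≤ PySem.List.len path then
        if (fwd && (d.getD (PySem.List.pyGetD path (-1) 0, PySem.List.pyGetD path 0 0) 0 == 1)) ||
            (bwd && (d.getD (PySem.List.pyGetD path 0 0, PySem.List.pyGetD path (-1) 0) 0 == 1)) then
          info.insert path
            (if (bwd && (d.getD (PySem.List.pyGetD path 0 0, PySem.List.pyGetD path (-1) 0) 0 == 1)) &&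
                !(fwd && (d.getD (PySem.List.pyGetD path (-1) 0, PySem.List.pyGetD path 0 0) 0 == 1)) then
              PySem.List.len path - 1 else 0)
        else info
      else info).get? c = info.get? c := by
      split_ifs
      · exact PySem.Dict.get?_insert_of_ne _ _ hpc
      · exact PySem.Dict.get?_insert_of_ne _ _ hpc
      · rfl
      · rfl
    refine Eq.trans (pvFoldlPres (fun dd : PySem.Dict (List Int) Int => dd.get? c) _ _ _ ?_) h1
    intro b w _
    dsimp only
    split_ifs with hc1 hc2
    · rfl
    · exact ih (path ++ [w]) b _ _
        (fun hh => h ((List.prefix_append _ _).trans hh))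
    · rfl

theorem pvGrow_main (d : PySem.Dict (Int × Int) Int) (n : Int) (c : List Int)
    (hcn : c ≠ []) (hnd : c.Nodup) (hlen : 2 ≤ c.length)
    (hm0 : 0 ≤ c.headD 0)
    (htail : ∀ x ∈ c.tail, c.headD 0 < x ∧ x < n) :
    ∀ (fuel : Nat) (path : List Int) (info : PySem.Dict (List Int) Int),
    path ≠ [] → path <+: c →
    info.get? c = none →
    n.toNat + 2 ≤ fuel + path.length →
    (pvFwdB d path || pvBwdB d path) = true →
    (pvGrow d n fuel info path (pvFwdB d path) (pvBwdB d path)).get? c = pvCLS d c := by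
  intro fuel
  induction fuel with
  | zero =>
    intro path info h1 h2 hnone hfuel hor
    exfalso
    obtain ⟨x, hx⟩ : ∃ x, x ∈ c.tail := by
      cases c with
      | nil => simp at hcn
      | cons a t =>
        cases t with
        | nil => simp at hlen
        | cons b q => exact ⟨b, List.mem_cons_self⟩
    have hxb := htail x hx
    have htnd : c.tail.Nodup := by
      cases c with
      | nil => simp
      | cons a t => exact (List.nodup_cons.mp hnd).2
    have htsub : c.tail ⊆ PySem.List.pyRange (c.headD 0 + 1) n 1 := by
      intro y hy
      exact PySem.List.mem_pyRange_one.mpr ⟨by have := (htail y hy).1; omega, (htail y hy).2⟩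
    have htlen := pvNodupSubsetLen htnd htsub
    rw [PySem.List.length_pyRange_one] at htlen
    have hclen : c.length = c.tail.length + 1 := by
      cases c with
      | nil => simp at hcn
      | cons a t => simp
    have hplen : path.length ≤ c.length := h2.length_le
    omega
  | succ f ih =>
    intro path info h1 h2 hnone hfuel hor
    obtain ⟨r, hr⟩ := h2
    have hu : PySem.List.pyGetD path (-1) 0 = path.getLastD 0 := by
      have h' : path.getLastD 0 = path.getLast h1 := by
        rw [List.getLastD_eq_getLast?, List.getLast?_eq_some_getLast h1]; rfl
      rw [PySem.List.pyGetD_neg_one path 0 h1, h']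
    have hm : PySem.List.pyGetD path 0 0 = c.headD 0 := by
      cases path with
      | nil => exact absurd rfl h1
      | cons a t =>
        rw [← hr]
        simp [PySem.List.pyGetD_zero_cons]
    simp only [pvGrow, hu, hm]
    cases r with
    | nil =>
      rw [List.append_nil] at hr
      subst hr
      have hlen2 : 2 ≤ PySem.List.len path := by
        simp only [PySem.List.len]; exact_mod_cast hlen
      rw [if_pos hlen2]
      refine Eq.trans (pvFoldlPres (fun dd : PySem.Dict (List Int) Int => dd.get? path) _ _ _ ?_) ?_
      · intro b w _
        dsimp only
        split_ifs with hc1 hc2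
        · rfl
        · refine pvGrow_frame d n path f (path ++ [w]) b _ _ ?_
          intro hh
          have := hh.length_le
          simp only [List.length_append, List.length_cons, List.length_nil] at this
          omega
        · rfl
      · simp only [pvCLS, pvCf, pvCb]
        split_ifs with hcc hval
        · rw [PySem.Dict.get?_insert_self]
          simp [PySem.List.len]
        · rw [PySem.Dict.get?_insert_self]
        · exact hnone
    | cons wst rest =>
      have hpc : c ≠ path := by
        rw [← hr]; intro hh
        have := congrArg List.length hh
        simp only [List.length_append, List.length_cons] at this
        omega
      have hwnp : wst ∉ path := by
        have hnd' : (path ++ wst :: rest).Nodup := hr.symm ▸ hnd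
        exact List.disjoint_right.mp (List.disjoint_of_nodup_append hnd') List.mem_cons_self
      have hwtl : wst ∈ c.tail := by
        rw [← hr]
        cases path with
        | nil => exact absurd rfl h1
        | cons a t => simp
      have hwb := htail wst hwtl
      have hext : ∀ w : Int, w ≠ wst → ¬ ((path ++ [w]) <+: c) := by
        intro w hww hpre
        obtain ⟨r2, hr2⟩ := hpre
        rw [← hr] at hr2
        rw [List.append_assoc] at hr2
        have := List.append_cancel_left hr2.symm
        simp only [List.singleton_append, List.cons.injEq] at this
        exact hww this.1.symm
      have hinfo1 : (if 2 ≤ PySem.List.len path then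
          if (pvFwdB d path && (d.getD (path.getLastD 0, c.headD 0) 0 == 1)) ||
              (pvBwdB d path && (d.getD (c.headD 0, path.getLastD 0) 0 == 1)) then
            info.insert path
              (if (pvBwdB d path && (d.getD (c.headD 0, path.getLastD 0) 0 == 1)) &&
                  !(pvFwdB d path && (d.getD (path.getLastD 0, c.headD 0) 0 == 1)) then
                PySem.List.len path - 1 else 0)
          else info
        else info).get? c = none := by
        split_ifs <;> first | exact hnone | rw [PySem.Dict.get?_insert_of_ne]
        all_goals first | exact hnone | exact hpc
      generalize hI : (if 2 ≤ PySem.List.len path then _ else info) = info1 at hinfo1 ⊢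
      have key : ∀ (ws : List Int) (inf : PySem.Dict (List Int) Int), ws.Nodup → wst ∈ ws →
          inf.get? c = none →
          (ws.foldl (fun inf w =>
            if path.contains w then inf
            else
              if (pvFwdB d path && (d.getD (path.getLastD 0, w) 0 == 1)) ||
                  (pvBwdB d path && (d.getD (w, path.getLastD 0) 0 == 1)) then
                pvGrow d n f inf (path ++ [w])
                  (pvFwdB d path && (d.getD (path.getLastD 0, w) 0 == 1))
                  (pvBwdB d path && (d.getD (w, path.getLastD 0) 0 == 1))
              else inf) inf).get? c = pvCLS d c := by
        intro ws
        induction ws with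
        | nil => intro inf _ hmem _; simp at hmem
        | cons w ws' ihw =>
          intro inf hndws hmem hnonef
          rw [List.foldl_cons]
          by_cases hww : w = wst
          · subst hww
            have hcont : path.contains w = false := by
              simp only [List.contains_eq_mem, decide_eq_false_iff_not]
              exact hwnp
            have e1 : (pvFwdB d path && (d.getD (path.getLastD 0, w) 0 == 1))
                = pvFwdB d (path ++ [w]) := (pvFwdB_snoc d path w h1).symm
            have e2 : (pvBwdB d path && (d.getD (w, path.getLastD 0) 0 == 1))
                = pvBwdB d (path ++ [w]) := (pvBwdB_snoc d path w h1).symm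
            simp only [hcont, Bool.false_eq_true, if_false, e1, e2]
            have hwnot' : w ∉ ws' := (List.nodup_cons.mp hndws).1
            have hpres : ∀ (b : PySem.Dict (List Int) Int) (w' : Int), w' ∈ ws' →
                ((if path.contains w' then b
                  else
                    if (pvFwdB d path && (d.getD (path.getLastD 0, w') 0 == 1)) ||
                        (pvBwdB d path && (d.getD (w', path.getLastD 0) 0 == 1)) then
                      pvGrow d n f b (path ++ [w'])
                        (pvFwdB d path && (d.getD (path.getLastD 0, w') 0 == 1))
                        (pvBwdB d path && (d.getD (w', path.getLastD 0) 0 == 1))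
                    else b)).get? c = b.get? c := by
              intro b w' hw'
              split_ifs with hc1 hc2
              · rfl
              · exact pvGrow_frame d n c f (path ++ [w']) b _ _
                  (hext w' (fun hh => hwnot' (hh ▸ hw')))
              · rfl
            cases hfb : (pvFwdB d (path ++ [w]) || pvBwdB d (path ++ [w])) with
            | true =>
              rw [if_pos rfl]
              refine Eq.trans (pvFoldlPres (fun dd : PySem.Dict (List Int) Int => dd.get? c)
                _ _ _ hpres) ?_
              refine ih (path ++ [w]) inf (by simp) ⟨rest, by rw [← hr]; simp⟩ hnonef ?_ hfb
              simp only [List.length_append, List.length_cons, List.length_nil]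
              omega
            | false =>
              rw [if_neg (by simp [hfb])]
              have hor2 := Bool.or_eq_false_iff.mp hfb
              have hCLS : pvCLS d c = none := by
                have hfc : pvFwdB d c = false := by
                  rw [← hr, show path ++ w :: rest = (path ++ [w]) ++ rest by simp]
                  exact pvFwdB_false_append d rest (path ++ [w]) (by simp) hor2.1
                have hbc : pvBwdB d c = false := by
                  rw [← hr, show path ++ w :: rest = (path ++ [w]) ++ rest by simp]
                  exact pvBwdB_false_append d rest (path ++ [w]) (by simp) hor2.2
                simp only [pvCLS, pvCf, pvCb, hfc, hbc, Bool.false_and, Bool.or_self,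
                  Bool.false_eq_true, if_false]
              rw [hCLS]
              exact Eq.trans (pvFoldlPres (fun dd : PySem.Dict (List Int) Int => dd.get? c)
                _ _ _ hpres) hnonef
          · have hstep : ((if path.contains w then inf
                else
                  if (pvFwdB d path && (d.getD (path.getLastD 0, w) 0 == 1)) ||
                      (pvBwdB d path && (d.getD (w, path.getLastD 0) 0 == 1)) then
                    pvGrow d n f inf (path ++ [w])
                      (pvFwdB d path && (d.getD (path.getLastD 0, w) 0 == 1))
                      (pvBwdB d path && (d.getD (w, path.getLastD 0) 0 == 1))
                  else inf)).get? c = none := by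
              rw [← hnonef]
              split_ifs with hc1 hc2
              · rfl
              · exact pvGrow_frame d n c f (path ++ [w]) inf _ _ (hext w hww)
              · rfl
            exact ihw _ (List.nodup_cons.mp hndws).2
              ((List.mem_cons.mp hmem).resolve_left (fun h => hww h.symm)) hstep
      refine key _ info1 (PySem.List.nodup_pyRange_one _ _) ?_ hinfo1
      refine PySem.List.mem_pyRange_one.mpr ⟨by omega, hwb.2⟩

theorem pvInfo_get? (d : PySem.Dict (Int × Int) Int) (n : Int) (c : List Int)
    (hcn : c ≠ []) (hnd : c.Nodup) (hlen : 2 ≤ c.length)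
    (hm0 : 0 ≤ c.headD 0) (hm1 : c.headD 0 < n)
    (htail : ∀ x ∈ c.tail, c.headD 0 < x ∧ x < n) :
    ((PySem.List.pyRange 0 n 1).foldl
      (fun inf m => pvGrow d n (n.toNat + 1) inf [m] true true) PySem.Dict.empty).get? c
      = pvCLS d c := by
  obtain ⟨t, hc⟩ : ∃ t, c = c.headD 0 :: t := by
    cases c with
    | nil => exact absurd rfl hcn
    | cons a t => exact ⟨t, rfl⟩
  have hhd : ∀ m : Int, m ≠ c.headD 0 → ¬ ([m] <+: c) := by
    intro m hm hpre
    obtain ⟨r, hr⟩ := hpre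
    have h' : c.headD 0 = m := by rw [← hr]; rfl
    exact hm h'.symm
  have hr1 : PySem.List.pyRange 0 n 1 =
      PySem.List.pyRange 0 (c.headD 0) 1 ++ (c.headD 0 :: PySem.List.pyRange (c.headD 0 + 1) n 1) := by
    rw [PySem.List.pyRange_one_append 0 (c.headD 0) n hm0 (le_of_lt hm1),
      PySem.List.pyRange_one_cons hm1]
  rw [hr1, List.foldl_append, List.foldl_cons]
  have hpre1 : ((PySem.List.pyRange 0 (c.headD 0) 1).foldl
      (fun inf m => pvGrow d n (n.toNat + 1) inf [m] true true)
      (PySem.Dict.empty : PySem.Dict (List Int) Int)).get? c = none := by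
    refine Eq.trans (pvFoldlPres (fun dd : PySem.Dict (List Int) Int => dd.get? c) _ _ _ ?_)
      (PySem.Dict.get?_empty _)
    intro b m hmm
    refine pvGrow_frame d n c _ [m] b _ _ (hhd m ?_)
    have := PySem.List.mem_pyRange_one.mp hmm
    omega
  have hmid : (pvGrow d n (n.toNat + 1)
      ((PySem.List.pyRange 0 (c.headD 0) 1).foldl
        (fun inf m => pvGrow d n (n.toNat + 1) inf [m] true true)
        (PySem.Dict.empty : PySem.Dict (List Int) Int)) [c.headD 0] true true).get? c
      = pvCLS d c := by
    have hmain := pvGrow_main d n c hcn hnd hlen hm0 htail (n.toNat + 1) [c.headD 0] _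
      (by simp) ⟨t, hc.symm⟩ hpre1
      (by simp only [List.length_singleton]; omega) rfl
    exact hmain
  refine Eq.trans (pvFoldlPres (fun dd : PySem.Dict (List Int) Int => dd.get? c) _ _ _ ?_) hmid
  intro b m hmm
  refine pvGrow_frame d n c _ [m] b _ _ (hhd m ?_)
  have := PySem.List.mem_pyRange_one.mp hmm
  omega

-- ---------- the fused equivalence of the two per-permutation passes ----------

theorem pvFuse2 (d dop : PySem.Dict (Int × Int) Int) (info : PySem.Dict (List Int) Int)
    (perm : List Int) (N : Int)
    (hvals : ∀ x : Int, 0 ≤ x → x < N →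
      0 ≤ PySem.List.pyGetD perm x 0 ∧ PySem.List.pyGetD perm x 0 < N)
    (hinj : ∀ i j : Int, 0 ≤ i → i < N → 0 ≤ j → j < N →
      PySem.List.pyGetD perm i 0 = PySem.List.pyGetD perm j 0 → i = j)
    (hop : ∀ a b : Int, 0 ≤ a → a < N → 0 ≤ b → b < N → a ≠ b →
      dop.getD (a, b) 0 = d.getD (b, a) 0)
    (hinfo : ∀ c : List Int, c ≠ [] → c.Nodup → 2 ≤ c.length →
      0 ≤ c.headD 0 → c.headD 0 < N →
      (∀ x ∈ c.tail, c.headD 0 < x ∧ x < N) →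
      info.get? c = pvCLS d c) :
    ∀ (starts : List Int) (seen : List Bool) (rem : List Int) (sizes : List Int)
      (phi : Int) (fuel : Nat),
    (seen.length : Int) = N →
    starts.Pairwise (· < ·) →
    (∀ x ∈ starts, 0 ≤ x ∧ x < N) →
    (∀ x : Int, 0 ≤ x → x < N → PySem.List.pyGetD seen x false = false → x ∈ starts) →
    (∀ x : Int, x ∈ rem ↔ (0 ≤ x ∧ x < N ∧ PySem.List.pyGetD seen x false = false)) →
    rem.Nodup →
    (∀ x : Int, 0 ≤ x → x < N → PySem.List.pyGetD seen x false = true →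
      PySem.List.pyGetD seen (PySem.List.pyGetD perm x 0) false = true) →
    rem.length + 1 ≤ fuel →
    (pvScanB info perm fuel rem sizes phi true).2.2
        = (pvLoopCycles d dop (pvCyclesAux perm starts seen) phi).1 ∧
    ((pvLoopCycles d dop (pvCyclesAux perm starts seen) phi).1 = true →
      pvScanB info perm fuel rem sizes phi true =
        (sizes ++ (pvCyclesAux perm starts seen).map (fun c => PySem.List.len c),
         (pvLoopCycles d dop (pvCyclesAux perm starts seen) phi).2, true)) := by
  intro starts
  induction starts with
  | nil =>
    intro seen rem sizes phi fuel hlen hpw hstarts hsub hrem hrnd hclosed hfuel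
    have hremnil : rem = [] := by
      rw [List.eq_nil_iff_forall_not_mem]
      intro x hx
      obtain ⟨h1, h2, h3⟩ := (hrem x).mp hx
      exact absurd (hsub x h1 h2 h3) (List.not_mem_nil)
    obtain ⟨f1, rfl⟩ : ∃ f1, fuel = f1 + 1 := ⟨fuel - 1, by omega⟩
    subst hremnil
    simp [pvScanB, pvCyclesAux, pvLoopCycles]
  | cons st rest ih =>
    intro seen rem sizes phi fuel hlen hpw hstarts hsub hrem hrnd hclosed hfuel
    have hst := hstarts st List.mem_cons_self
    have hrest : ∀ x ∈ rest, 0 ≤ x ∧ x < N := fun x hx => hstarts x (List.mem_cons_of_mem _ hx)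
    have hpw' : rest.Pairwise (· < ·) := (List.pairwise_cons.mp hpw).2
    have hstlt : ∀ y ∈ rest, st < y := (List.pairwise_cons.mp hpw).1
    cases hmk : PySem.List.pyGetD seen st false with
    | true =>
      simp only [pvCyclesAux, hmk, if_true]
      refine ih seen rem sizes phi fuel hlen hpw' hrest ?_ hrem hrnd hclosed hfuel
      intro x h1 h2 h3
      rcases List.mem_cons.mp (hsub x h1 h2 h3) with h | h
      · subst h; rw [hmk] at h3; exact absurd h3 (by simp)
      · exact h
    | false =>
      have hstrem : st ∈ rem := (hrem st).mpr ⟨hst.1, hst.2, hmk⟩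
      have hremne : rem ≠ [] := fun h => by rw [h] at hstrem; exact absurd hstrem List.not_mem_nil
      obtain ⟨f1, rfl⟩ : ∃ f1, fuel = f1 + 1 := ⟨fuel - 1, by omega⟩
      have hrlen1 : 1 ≤ rem.length := by
        cases rem with
        | nil => exact absurd rfl hremne
        | cons a r => simp
      have hf1 : 1 ≤ f1 := by omega
      -- min(remaining) = st
      have hmin : (PySem.List.min? rem (fun x => x)).getD 0 = st := by
        cases hm' : PySem.List.min? rem (fun x => x) with
        | none => exact absurd ((PySem.List.min?_eq_none_iff _ _).mp hm') hremne
        | some m' =>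
          have hmem := PySem.List.min?_mem hm'
          have hle1 : m' ≤ st := PySem.List.min?_isMin hm' st hstrem
          have hm'r := (hrem m').mp hmem
          have hm'starts := hsub m' hm'r.1 hm'r.2.1 hm'r.2.2
          have hle2 : st ≤ m' := by
            rcases List.mem_cons.mp hm'starts with h | h
            · omega
            · have := hstlt m' h; omega
          have : m' = st := by omega
          rw [this]; rfl
      -- A's walk
      obtain ⟨t, seen2, hw, hndp, hpropsp, hchainp, hclosep, hlen2, hiff2⟩ :=
        pvWalkA_run perm N hvals hinj seen hlen hclosed st hst.1 hst.2 hmk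
      have hcycA : pvCyclesAux perm (st :: rest) seen
          = (st :: t) :: pvCyclesAux perm rest seen2 := by
        simp only [pvCyclesAux, hmk, Bool.false_eq_true, if_false, hw]
      -- B's walk retraces it
      have hpsub : ∀ x ∈ st :: t, x ∈ rem := by
        intro x hx
        obtain ⟨h1, h2, h3⟩ := hpropsp x hx
        exact (hrem x).mpr ⟨h1, h2, h3⟩
      have hplen : (st :: t).length ≤ rem.length := pvNodupSubsetLen hndp hpsub
      have hwalkB : pvWalkC perm st (rem.length + 1) (PySem.Set.discard rem st) [st]
          (PySem.List.pyGetD perm st 0) = ((st :: t).foldl PySem.Set.discard rem, st :: t) := by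
        cases t with
        | nil =>
          have hfix : PySem.List.pyGetD perm st 0 = st := by simpa using hclosep
          obtain ⟨f2, hf2⟩ : ∃ f2, rem.length + 1 = f2 + 1 := ⟨rem.length, rfl⟩
          rw [hf2, hfix]
          simp [pvWalkC]
        | cons c0 t' =>
          have hch : pvChain perm (st :: c0 :: t') := hchainp
          have hv0 : PySem.List.pyGetD perm st 0 = c0 := hch.1
          rw [hv0]
          have hstnt : st ∉ c0 :: t' := (List.nodup_cons.mp hndp).1
          have hclose' : PySem.List.pyGetD perm ((c0 :: t').getLastD 0) 0 = st := by
            have h1 : (st :: c0 :: t').getLastD 0 = (c0 :: t').getLastD 0 := by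
              rw [List.getLastD_cons]
              rw [List.getLastD_eq_getLast?, List.getLastD_eq_getLast?,
                List.getLast?_eq_some_getLast (l := c0 :: t') (by simp)]
              rfl
            rw [← h1]; exact hclosep
          rw [pvWalkC_run perm st (t') (rem.length + 1) (PySem.Set.discard rem st) [st] c0
            (by simp at hplen ⊢; omega) hstnt (pvChain_tail perm st _ hch) hclose']
          simp
      -- the new remaining set
      have hrem2 : ∀ x : Int, x ∈ (st :: t).foldl PySem.Set.discard rem ↔
          (0 ≤ x ∧ x < N ∧ PySem.List.pyGetD seen2 x false = false) := by
        intro x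
        rw [pvMemFoldlDiscard, hrem]
        constructor
        · rintro ⟨⟨h1, h2, h3⟩, h4⟩
          refine ⟨h1, h2, ?_⟩
          cases h5 : PySem.List.pyGetD seen2 x false with
          | false => rfl
          | true =>
            rcases (hiff2 x h1 h2).mp h5 with h6 | h6
            · rw [h3] at h6; exact absurd h6 Bool.false_ne_true
            · exact absurd h6 h4
        · rintro ⟨h1, h2, h3⟩
          have h4 : x ∉ st :: t := by
            intro h5
            have := (hiff2 x h1 h2).mpr (Or.inr h5)
            rw [h3] at this; exact absurd this Bool.false_ne_true
          have h5 : PySem.List.pyGetD seen x false = false := by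
            cases h6 : PySem.List.pyGetD seen x false with
            | false => rfl
            | true =>
              have := (hiff2 x h1 h2).mpr (Or.inl h6)
              rw [h3] at this; exact absurd this Bool.false_ne_true
          exact ⟨⟨h1, h2, h5⟩, h4⟩
      have hrnd2 : ((st :: t).foldl PySem.Set.discard rem).Nodup := pvNodupFoldlDiscard _ _ hrnd
      have hlen2' : ((st :: t).foldl PySem.Set.discard rem).length + 1 ≤ f1 := by
        have hsub2 : (st :: t).foldl PySem.Set.discard rem ⊆ rem.erase st := by
          intro x hx
          obtain ⟨h1, h2⟩ := (pvMemFoldlDiscard _ _ x).mp hx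
          rw [List.Nodup.mem_erase_iff hrnd]
          exact ⟨fun hh => h2 (hh ▸ List.mem_cons_self), h1⟩
        have := pvNodupSubsetLen hrnd2 hsub2
        rw [List.length_erase_of_mem hstrem] at this
        omega
      have hclosed2 : ∀ x : Int, 0 ≤ x → x < N → PySem.List.pyGetD seen2 x false = true →
          PySem.List.pyGetD seen2 (PySem.List.pyGetD perm x 0) false = true := by
        intro x h1 h2 h3
        have hpb := hvals x h1 h2
        rcases (hiff2 x h1 h2).mp h3 with h4 | h4
        · exact (hiff2 _ hpb.1 hpb.2).mpr (Or.inl (hclosed x h1 h2 h4))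
        · exact (hiff2 _ hpb.1 hpb.2).mpr
            (Or.inr (pvChain_cycle_closed perm (st :: t) hchainp (by simpa using hclosep) x h4))
      have hsub2' : ∀ x : Int, 0 ≤ x → x < N → PySem.List.pyGetD seen2 x false = false →
          x ∈ rest := by
        intro x h1 h2 h3
        have h4 : PySem.List.pyGetD seen x false = false := by
          cases h5 : PySem.List.pyGetD seen x false with
          | false => rfl
          | true =>
            have := (hiff2 x h1 h2).mpr (Or.inl h5)
            rw [h3] at this; exact absurd this Bool.false_ne_true
        have h5 : x ∉ st :: t := by
          intro h6
          have := (hiff2 x h1 h2).mpr (Or.inr h6)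
          rw [h3] at this; exact absurd this Bool.false_ne_true
        rcases List.mem_cons.mp (hsub x h1 h2 h4) with h | h
        · exact absurd (h ▸ List.mem_cons_self) h5
        · exact h
      have ih2 := ih seen2 ((st :: t).foldl PySem.Set.discard rem) (sizes ++ [PySem.List.len (st :: t)])
      -- unfold one step of B
      have hunfold : pvScanB info perm (f1 + 1) rem sizes phi true =
          (if (1 : Int) < PySem.List.len (st :: t) then
            match info.get? (st :: t) with
            | none => pvScanB info perm f1 ((st :: t).foldl PySem.Set.discard rem)
                (sizes ++ [PySem.List.len (st :: t)]) phi false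
            | some p => pvScanB info perm f1 ((st :: t).foldl PySem.Set.discard rem)
                (sizes ++ [PySem.List.len (st :: t)]) (phi + p) true
          else pvScanB info perm f1 ((st :: t).foldl PySem.Set.discard rem)
            (sizes ++ [PySem.List.len (st :: t)]) phi true) := by
        have hne : rem.isEmpty = false := by
          cases rem with
          | nil => exact absurd rfl hremne
          | cons a r => rfl
        simp only [pvScanB, hne, Bool.not_true, Bool.or_self, Bool.false_eq_true, if_false,
          hmin, hwalkB]
      rw [hcycA, hunfold]
      cases t with
      | nil =>
        have hk1 : ¬ ((1 : Int) < PySem.List.len [st]) := by simp [PySem.List.len]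
        have hk1' : (PySem.List.len [st] == (1 : Int)) = true := by simp [PySem.List.len]
        rw [if_neg hk1]
        simp only [pvLoopCycles, hk1', if_true]
        obtain ⟨e1, e2⟩ := ih2 phi f1 hlen2 hpw' hrest hsub2' hrem2 hrnd2 hclosed2 hlen2'
        refine ⟨e1, fun hv => ?_⟩
        rw [e2 hv]
        simp [List.append_assoc]
      | cons c0 t' =>
        set p := st :: c0 :: t' with hp
        have hk2 : (1 : Int) < PySem.List.len p := by
          simp only [PySem.List.len, hp, List.length_cons]
          push_cast; omega
        have hk2' : (PySem.List.len p == (1 : Int)) = false := by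
          simp only [beq_eq_false_iff_ne, ne_eq, PySem.List.len, hp, List.length_cons]
          push_cast; omega
        rw [if_pos hk2]
        have hlenp : p.length ≠ 1 := by simp [hp]
        have hpne : p ≠ [] := by simp [hp]
        have hpbounds : ∀ x ∈ p, 0 ≤ x ∧ x < N := fun x hx =>
          ⟨(hpropsp x hx).1, (hpropsp x hx).2.1⟩
        -- classification agreement
        have hinfop : info.get? p = pvCLS d p := by
          refine hinfo p hpne hndp (by simp [hp]) (by simpa [hp] using hst.1)
            (by simpa [hp] using hst.2) ?_
          intro x hx
          have hxp : x ∈ p := by rw [hp]; exact List.mem_cons_of_mem _ (by simpa [hp] using hx)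
          have hxprops := hpropsp x hxp
          have hxstarts := hsub x hxprops.1 hxprops.2.1 hxprops.2.2
          have hxnest : x ≠ st := by
            intro hh
            subst hh
            exact (List.nodup_cons.mp hndp).1 (by simpa [hp] using hx)
          constructor
          · simp only [hp, List.headD_cons]
            rcases List.mem_cons.mp hxstarts with h | h
            · exact absurd h hxnest
            · exact hstlt x h
          · exact hxprops.2.1
        have hcf : pvCf d p = pvIsDirCycle p d := pvCf_eq_isDir d p hpne hlenp
        have hcb : pvCb d p = pvIsDirCycle p dop :=
          pvCb_eq_isDir_op d dop p N hpne hlenp hndp hpbounds hop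
        simp only [pvLoopCycles, hk2', Bool.false_eq_true, if_false]
        rw [hinfop]
        unfold pvCLS
        rw [hcf, hcb]
        cases hT : pvIsDirCycle p d <;> cases hTop : pvIsDirCycle p dop
        · -- both false: invalid
          simp only [Bool.or_self, Bool.false_eq_true, if_false, Bool.not_false, Bool.and_self,
            if_true]
          obtain ⟨f2, rfl⟩ : ∃ f2, f1 = f2 + 1 := ⟨f1 - 1, by omega⟩
          simp [pvScanB]
        · -- fwd false, bwd true: phi increment
          simp only [Bool.false_or, if_true, Bool.not_false, Bool.and_true, Bool.true_and,
            Bool.not_true, Bool.false_and, Bool.false_eq_true, if_false, Bool.and_false]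
          obtain ⟨e1, e2⟩ := ih2 (phi + ((p.length : Int) - 1)) f1 hlen2 hpw' hrest hsub2'
            hrem2 hrnd2 hclosed2 hlen2'
          have hval : phi + (PySem.List.len p - 1) = phi + ((p.length : Int) - 1) := by
            simp [PySem.List.len]
          rw [hval]
          refine ⟨e1, fun hv => ?_⟩
          rw [e2 hv]
          simp [List.append_assoc]
        · -- fwd true, bwd false
          simp only [Bool.true_or, if_true, Bool.not_true, Bool.and_false, Bool.false_and,
            Bool.false_eq_true, if_false, Bool.and_true]
          rw [add_zero]
          obtain ⟨e1, e2⟩ := ih2 phi f1 hlen2 hpw' hrest hsub2' hrem2 hrnd2 hclosed2 hlen2'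
          refine ⟨e1, fun hv => ?_⟩
          rw [e2 hv]
          simp [List.append_assoc]
        · -- both true
          simp only [Bool.true_or, if_true, Bool.not_true, Bool.and_false, Bool.false_and,
            Bool.false_eq_true, if_false, Bool.true_and]
          rw [add_zero]
          obtain ⟨e1, e2⟩ := ih2 phi f1 hlen2 hpw' hrest hsub2' hrem2 hrnd2 hclosed2 hlen2'
          refine ⟨e1, fun hv => ?_⟩
          rw [e2 hv]
          simp [List.append_assoc]

-- ===== VERDICT (by name: the statement is the Claim_ definition above) =====
theorem compute_p_expansion_spec : Claim_equal_compute_p_expansion := by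
  unfold Claim_equal_compute_p_expansion
  intro n adj _
  unfold Spec_compute_p_expansion compute_p_expansion compute_p_expansion_alt
  dsimp only
  congr 1
  apply PySem.List.foldl_congr_mem'
  intro perm hmem co
  have hp := PySem.List.perm_of_mem_permutations hmem
  have hplen : perm.length = n.toNat := by
    rw [hp.length_eq, PySem.List.length_pyRange_one]
    simp
  have hpnd : perm.Nodup := hp.nodup_iff.mpr (PySem.List.nodup_pyRange_one _ _)
  have hmemv : ∀ x ∈ perm, 0 ≤ x ∧ x < n := fun x hx =>
    PySem.List.mem_pyRange_one.mp (hp.mem_iff.mp hx)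
  have hvals : ∀ x : Int, 0 ≤ x → x < ((n.toNat : Int)) →
      0 ≤ PySem.List.pyGetD perm x 0 ∧ PySem.List.pyGetD perm x 0 < ((n.toNat : Int)) := by
    intro x h0 h1
    have hx : x.toNat < perm.length := by rw [hplen]; omega
    rw [PySem.List.pyGetD_eq_getElem perm 0 h0 (by rw [hplen]; exact_mod_cast h1)]
    have hb := hmemv _ (perm.getElem_mem hx)
    exact ⟨hb.1, by omega⟩
  have hinj : ∀ i j : Int, 0 ≤ i → i < ((n.toNat : Int)) → 0 ≤ j → j < ((n.toNat : Int)) →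
      PySem.List.pyGetD perm i 0 = PySem.List.pyGetD perm j 0 → i = j := by
    intro i j hi0 hi1 hj0 hj1 heq
    have hi : i < (perm.length : Int) := by rw [hplen]; exact_mod_cast hi1
    have hj : j < (perm.length : Int) := by rw [hplen]; exact_mod_cast hj1
    rw [PySem.List.pyGetD_eq_getElem perm 0 hi0 hi, PySem.List.pyGetD_eq_getElem perm 0 hj0 hj]
      at heq
    have := (List.Nodup.getElem_inj_iff hpnd).mp heq
    omega
  have hop : ∀ a b : Int, 0 ≤ a → a < ((n.toNat : Int)) → 0 ≤ b → b < ((n.toNat : Int)) → a ≠ b →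
      ((PySem.List.pyRange 0 n 1).foldl (fun dd i =>
        (PySem.List.pyRange 0 n 1).foldl (fun dd j =>
          if i = j then dd else dd.insert (j, i) ((pvAdjDict adj).getD (i, j) 0)) dd)
        PySem.Dict.empty).getD (a, b) 0 = (pvAdjDict adj).getD (b, a) 0 := by
    intro a b ha ha' hb hb' hne
    exact pvAdjOp_getD (pvAdjDict adj) n a b ha (by omega) hb (by omega) hne
  have hinfo : ∀ c : List Int, c ≠ [] → c.Nodup → 2 ≤ c.length →
      0 ≤ c.headD 0 → c.headD 0 < ((n.toNat : Int)) →
      (∀ x ∈ c.tail, c.headD 0 < x ∧ x < ((n.toNat : Int))) →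
      ((PySem.List.pyRange 0 n 1).foldl
        (fun inf m => pvGrow (pvAdjDict adj) n (n.toNat + 1) inf [m] true true)
        PySem.Dict.empty).get? c = pvCLS (pvAdjDict adj) c := by
    intro c h1 h2 h3 h4 h5 h6
    refine pvInfo_get? (pvAdjDict adj) n c h1 h2 h3 h4 (by omega) ?_
    intro x hx
    exact ⟨(h6 x hx).1, by have := (h6 x hx).2; omega⟩
  have hrange : PySem.List.pyRange 0 ((n.toNat : Int)) 1 = PySem.List.pyRange 0 n 1 := by
    by_cases hn : 0 ≤ n
    · rw [Int.toNat_of_nonneg hn]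
    · rw [PySem.List.pyRange_one_eq_nil (by omega), PySem.List.pyRange_one_eq_nil (by omega)]
  have hstartsA : PySem.List.pyRange 0 (PySem.List.len perm) 1 = PySem.List.pyRange 0 n 1 := by
    simp only [PySem.List.len, hplen]
    exact hrange
  have hseen : PySem.List.pyRepeat [false] (PySem.List.len perm)
      = List.replicate n.toNat false := by
    rw [PySem.List.pyRepeat_singleton, PySem.List.len]
    congr 1
  have hremmem : ∀ x : Int, x ∈ PySem.Set.ofList (PySem.List.pyRange 0 n 1) ↔
      (0 ≤ x ∧ x < ((n.toNat : Int)) ∧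
        PySem.List.pyGetD (List.replicate n.toNat false) x false = false) := by
    intro x
    rw [PySem.Set.mem_ofList, PySem.List.mem_pyRange_one]
    constructor
    · intro h
      exact ⟨h.1, by omega, pvGetD_replicate_false _ _⟩
    · intro h
      exact ⟨h.1, by omega⟩
  have hremnd : (PySem.Set.ofList (PySem.List.pyRange 0 n 1)).Nodup :=
    PySem.Set.nodup_ofList _
  have hremlen : (PySem.Set.ofList (PySem.List.pyRange 0 n 1)).length + 1 ≤ n.toNat + 1 := by
    have hsub : PySem.Set.ofList (PySem.List.pyRange 0 n 1) ⊆ PySem.List.pyRange 0 n 1 := by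
      intro x hx
      exact (PySem.Set.mem_ofList _ _).mp hx
    have := pvNodupSubsetLen hremnd hsub
    rw [PySem.List.length_pyRange_one] at this
    omega
  obtain ⟨e1, e2⟩ := pvFuse2 (pvAdjDict adj)
    ((PySem.List.pyRange 0 n 1).foldl (fun dd i =>
        (PySem.List.pyRange 0 n 1).foldl (fun dd j =>
          if i = j then dd else dd.insert (j, i) ((pvAdjDict adj).getD (i, j) 0)) dd)
      PySem.Dict.empty)
    ((PySem.List.pyRange 0 n 1).foldl
      (fun inf m => pvGrow (pvAdjDict adj) n (n.toNat + 1) inf [m] true true)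
      PySem.Dict.empty)
    perm ((n.toNat : Int)) hvals hinj hop hinfo
    (PySem.List.pyRange 0 n 1) (List.replicate n.toNat false)
    (PySem.Set.ofList (PySem.List.pyRange 0 n 1)) [] 0 (n.toNat + 1)
    (by simp)
    (by rw [← hrange]; exact PySem.List.pairwise_lt_pyRange_one _ _)
    (by
      intro x hx
      have := PySem.List.mem_pyRange_one.mp hx
      exact ⟨this.1, by omega⟩)
    (by
      intro x h1 h2 _
      exact PySem.List.mem_pyRange_one.mpr ⟨h1, by omega⟩)
    hremmem hremnd
    (by
      intro x h1 h2 h3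
      rw [pvGetD_replicate_false] at h3
      exact absurd h3 Bool.false_ne_true)
    hremlen
  rw [pvGetCycles_eq, hstartsA, hseen]
  cases hv : (pvLoopCycles (pvAdjDict adj)
      ((PySem.List.pyRange 0 n 1).foldl (fun dd i =>
        (PySem.List.pyRange 0 n 1).foldl (fun dd j =>
          if i = j then dd else dd.insert (j, i) ((pvAdjDict adj).getD (i, j) 0)) dd)
        PySem.Dict.empty)
      (pvCyclesAux perm (PySem.List.pyRange 0 n 1) (List.replicate n.toNat false)) 0).1 with
  | false =>
    rw [hv] at e1
    simp only [e1, Bool.false_eq_true, if_false]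
  | true =>
    rw [hv] at e1 e2
    rw [e1, e2 rfl]
    simp [PySem.Dict.modify]
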